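-- pv_equiv track=rewrite | github.com/khssupriya/PythonPrograms | pick10.py | pick10
-- ===== SOURCE A (Python) =====
-- def pick10(s: str, n:int) -> str:
--     l = len(s)
--     visited =""
--     i = 1
--     n = n%l
--     while len(visited) != 10:
--         visited += s[n]
--         n = (n + i)%l
--         i += 1
--     return visited
-- ===== SOURCE B (Python) =====
-- def pick10(s: str, n: int) -> str:
--     l = len(s)
--     return ''.join(s[(n % l + k * (k + 1) // 2) % l] for k in range(10))
-- ===== Notes on version B (the rewrite author's own statement) =====
-- stated objective: simpler
-- what changed: Replaces the stateful while-loop (accumulating string, running index n and increasing step i) with a direct closed-form index: the k-th picked character sits at (n % l + k*(k+1)//2) % l, so B is a single join over range(10).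
import Mathlib
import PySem

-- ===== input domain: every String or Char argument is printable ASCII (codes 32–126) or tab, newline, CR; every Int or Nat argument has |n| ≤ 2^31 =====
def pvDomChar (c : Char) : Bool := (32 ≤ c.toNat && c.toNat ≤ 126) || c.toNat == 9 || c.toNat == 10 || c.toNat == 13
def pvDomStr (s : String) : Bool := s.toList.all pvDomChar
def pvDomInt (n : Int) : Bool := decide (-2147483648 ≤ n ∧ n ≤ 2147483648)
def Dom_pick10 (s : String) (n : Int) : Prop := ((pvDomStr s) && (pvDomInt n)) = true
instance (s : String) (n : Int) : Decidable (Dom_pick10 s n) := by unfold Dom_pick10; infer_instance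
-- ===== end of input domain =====

-- B replaces A's stateful while-loop with a closed-form index (n % l + k*(k+1)//2) % l per picked character: simpler, same cost.


-- ===== PORT A =====
-- while len(visited) != 10: visited += s[n]; n = (n+i) % l; i += 1
-- (visited grows by exactly one char per iteration starting from "", so the Python
--  condition 'len(visited) != 10' is '< 10' on every reachable state; '<' gives termination)
def pick10Loop (s : List Char) (l : Int) (visited : List Char) (n : Int) (i : Int) : List Char :=
  if visited.length < 10 then
    match PySem.List.pyGet? s n with
    | none => visited      -- Python raises IndexError here; unreachable under Pre_
    | some c => pick10Loop s l (visited ++ [c]) (PySem.Int.mod (n + i) l) (i + 1)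
  else visited
termination_by 10 - visited.length
decreasing_by simp; omega

def pick10 (s : String) (n : Int) : String :=
  let l : Int := PySem.Str.len s
  String.ofList (pick10Loop s.toList l [] (PySem.Int.mod n l) 1)

-- ===== PORT B =====
-- ''.join(s[(n % l + k*(k+1)//2) % l] for k in range(10)); the .getD default is
-- unreachable under Pre_ (the index is always in range when s ≠ ""; Python raises on s = "").
def pick10_alt (s : String) (n : Int) : String :=
  let l : Int := PySem.Str.len s
  String.ofList ((PySem.List.pyRange 0 10 1).map (fun k =>
    (PySem.List.pyGet? s.toList
      (PySem.Int.mod (PySem.Int.mod n l + PySem.Int.floordiv (k * (k + 1)) 2) l)).getD ' '))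

-- ===== PRECONDITION & SPEC =====
-- Pre_ excludes exactly the empty string, on which Python A raises ZeroDivisionError (n % 0).
def Pre_pick10 (s : String) (n : Int) : Prop := s ≠ ""
instance (s : String) (n : Int) : Decidable (Pre_pick10 s n) := by unfold Pre_pick10; infer_instance

def pvWitness_pick10 : String × Int := ("abcdefgh", 3)

def Spec_pick10 (s : String) (n : Int) (out : String) : Prop := out = pick10_alt s n
instance (s : String) (n : Int) (out : String) : Decidable (Spec_pick10 s n out) := by unfold Spec_pick10; infer_instance

-- ===== CLAIM (what is proved, stated in full; the proofs are below) =====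
def Claim_equal_pick10 : Prop := ∀ (s : String) (n : Int), Dom_pick10 s n → Pre_pick10 s n → Spec_pick10 s n (pick10 s n)

-- ===== LEMMAS AND PROOFS =====

-- (a % l + b) % l = (a + b) % l for Python mod, positive l
lemma pmod_add (l : Int) (hl : 0 < l) (a b : Int) :
    PySem.Int.mod (PySem.Int.mod a l + b) l = PySem.Int.mod (a + b) l := by
  rw [PySem.Int.mod_eq_emod_of_pos hl, PySem.Int.mod_eq_emod_of_pos hl,
      PySem.Int.mod_eq_emod_of_pos hl, Int.add_emod, Int.emod_emod_of_dvd _ dvd_rfl,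
      ← Int.add_emod]

-- offset accumulated by the loop after k steps when the step counter started at i:
-- 0, i, i+(i+1), … ; for i = 1 this is the k-th triangular number k*(k+1)/2
def offA (i : Int) : Nat → Int
  | 0 => 0
  | k + 1 => offA i k + (i + k)

lemma offA_shift (i : Int) (k : Nat) : i + offA (i + 1) k = offA i (k + 1) := by
  induction k with
  | zero => simp [offA]
  | succ j ihj =>
    show i + (offA (i + 1) j + (i + 1 + j)) = offA i (j + 1) + (i + (j + 1))
    push_cast at ihj
    omega

-- the loop, started at a reduced index m with step counter i, returns the closed-form picks
lemma loop_closed (cs : List Char) (hl : cs ≠ []) :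
    ∀ (fuel : Nat) (v : List Char) (m i : Int), v.length + fuel = 10 → 0 ≤ m → m < cs.length →
    pick10Loop cs (cs.length) v m i =
      v ++ (List.range fuel).map
        (fun k => cs.getD (PySem.Int.mod (m + offA i k) cs.length).toNat ' ') := by
  intro fuel
  induction fuel with
  | zero =>
    intro v m i hlen _ _
    rw [pick10Loop, if_neg (by omega)]
    simp
  | succ f ih =>
    intro v m i hlen hm0 hm1
    have hlpos : (0 : Int) < cs.length := by
      have := List.length_pos_of_ne_nil hl; omega
    rw [pick10Loop, if_pos (by omega)]
    have hlt : m.toNat < cs.length := by omega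
    have hget : PySem.List.pyGet? cs m = some (cs.getD m.toNat ' ') := by
      rw [PySem.List.pyGet?_of_nonneg cs hm0, List.getElem?_eq_getElem hlt,
          List.getD_eq_getElem cs ' ' hlt]
    rw [hget]
    dsimp only
    rw [ih (v ++ [cs.getD m.toNat ' ']) (PySem.Int.mod (m + i) cs.length) (i + 1)
          (by simp; omega) (PySem.Int.mod_nonneg _ hlpos) (PySem.Int.mod_lt _ hlpos)]
    rw [List.range_succ_eq_map, List.map_cons, List.map_map, List.append_assoc,
        List.singleton_append]
    congr 1
    have h0 : PySem.Int.mod (m + offA i 0) cs.length = m := by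
      show PySem.Int.mod (m + 0) cs.length = m
      rw [add_zero, PySem.Int.mod_eq_emod_of_pos hlpos, Int.emod_eq_of_lt hm0 hm1]
    rw [h0]
    congr 1
    apply List.map_congr_left
    intro k _
    simp only [Function.comp]
    congr 2
    rw [pmod_add _ hlpos]
    congr 1
    show m + i + offA (i + 1) k = m + offA i (k + 1)
    rw [add_assoc, offA_shift]

-- B's per-element value as direct indexing (the index is nonnegative, so no IndexError)
lemma elem_eq (cs : List Char) (x : Int) (hx0 : 0 ≤ x) :
    (PySem.List.pyGet? cs x).getD ' ' = cs.getD x.toNat ' ' := by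
  rw [PySem.List.pyGet?_of_nonneg cs hx0, List.getD_eq_getElem?_getD]

-- ===== VERDICT (by name: the statement is the Claim_ definition above) =====
theorem pick10_spec : Claim_equal_pick10 := by
  intro s n _ hpre
  unfold Spec_pick10 pick10 pick10_alt
  have hcs : s.toList ≠ [] := by
    intro h
    exact hpre (by simpa using congrArg String.ofList h)
  have hlen : PySem.Str.len s = (s.toList.length : Int) := by
    simp [PySem.Str.len_eq]
  have hlpos : (0 : Int) < s.toList.length := by
    have := List.length_pos_of_ne_nil hcs; omega
  simp only [hlen]
  rw [loop_closed s.toList hcs 10 [] (PySem.Int.mod n s.toList.length) 1 (by simp)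
        (PySem.Int.mod_nonneg _ hlpos) (PySem.Int.mod_lt _ hlpos)]
  have hrange : PySem.List.pyRange 0 10 1 = [0,1,2,3,4,5,6,7,8,9] := by decide
  rw [hrange]
  set m := PySem.Int.mod n s.toList.length with hm
  have E : ∀ t : Int,
      (PySem.List.pyGet? s.toList (PySem.Int.mod (m + t) (s.toList.length : Int))).getD ' '
      = s.toList.getD (PySem.Int.mod (m + t) (s.toList.length : Int)).toNat ' ' := fun t =>
    elem_eq s.toList _ (PySem.Int.mod_nonneg _ hlpos)
  congr 1
  rw [List.nil_append, show List.range 10 = [0,1,2,3,4,5,6,7,8,9] from rfl]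
  simp only [List.map_cons, List.map_nil, List.cons.injEq, and_true]
  refine ⟨?_, ?_, ?_, ?_, ?_, ?_, ?_, ?_, ?_, ?_⟩
  · rw [show PySem.Int.floordiv (0 * (0 + 1)) 2 = offA 1 0 from by decide]; exact (E _).symm
  · rw [show PySem.Int.floordiv (1 * (1 + 1)) 2 = offA 1 1 from by decide]; exact (E _).symm
  · rw [show PySem.Int.floordiv (2 * (2 + 1)) 2 = offA 1 2 from by decide]; exact (E _).symm
  · rw [show PySem.Int.floordiv (3 * (3 + 1)) 2 = offA 1 3 from by decide]; exact (E _).symm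
  · rw [show PySem.Int.floordiv (4 * (4 + 1)) 2 = offA 1 4 from by decide]; exact (E _).symm
  · rw [show PySem.Int.floordiv (5 * (5 + 1)) 2 = offA 1 5 from by decide]; exact (E _).symm
  · rw [show PySem.Int.floordiv (6 * (6 + 1)) 2 = offA 1 6 from by decide]; exact (E _).symm
  · rw [show PySem.Int.floordiv (7 * (7 + 1)) 2 = offA 1 7 from by decide]; exact (E _).symm
  · rw [show PySem.Int.floordiv (8 * (8 + 1)) 2 = offA 1 8 from by decide]; exact (E _).symm
  · rw [show PySem.Int.floordiv (9 * (9 + 1)) 2 = offA 1 9 from by decide]; exact (E _).symm
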